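-- pv_equiv track=rewrite | github.com/maengjj/MyAlgorithm | 백준/Silver/31860. 열심히 일하는 중/열심히 일하는 중.py | calculate_satisfaction_and_days
-- ===== SOURCE A (Python) =====
-- import heapq
--
-- def calculate_satisfaction_and_days(N, M, K, priorities):
--     max_heap = [-p for p in priorities]
--     heapq.heapify(max_heap)
--
--     satisfaction = 0
--     days = 0
--     satisfaction_list = []
--
--     while max_heap:
--         current_priority = -heapq.heappop(max_heap)
--
--         satisfaction = (satisfaction // 2) + current_priority
--         satisfaction_list.append(satisfaction)
--         days += 1
--
--         current_priority -= M
--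
--         if current_priority > K:
--             heapq.heappush(max_heap, -current_priority)
--
--     return days, satisfaction_list
-- ===== SOURCE B (Python) =====
-- def calculate_satisfaction_and_days(N, M, K, priorities):
--     vals = []
--     for p in priorities:
--         vals.append(p)
--         while p - M > K:
--             p -= M
--             vals.append(p)
--     vals.sort(reverse=True)
--     satisfaction = 0
--     out = []
--     for v in vals:
--         satisfaction = satisfaction // 2 + v
--         out.append(satisfaction)
--     return len(out), out
-- ===== Notes on version B (the rewrite author's own statement) =====
-- stated objective: alternative
-- what changed: Replaces the incremental max-heap pop/reinsert simulation by generating each priority's full decay chain up front, sorting all emitted values once in descending order, and computing the satisfaction sequence in a single pass.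
import Mathlib
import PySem

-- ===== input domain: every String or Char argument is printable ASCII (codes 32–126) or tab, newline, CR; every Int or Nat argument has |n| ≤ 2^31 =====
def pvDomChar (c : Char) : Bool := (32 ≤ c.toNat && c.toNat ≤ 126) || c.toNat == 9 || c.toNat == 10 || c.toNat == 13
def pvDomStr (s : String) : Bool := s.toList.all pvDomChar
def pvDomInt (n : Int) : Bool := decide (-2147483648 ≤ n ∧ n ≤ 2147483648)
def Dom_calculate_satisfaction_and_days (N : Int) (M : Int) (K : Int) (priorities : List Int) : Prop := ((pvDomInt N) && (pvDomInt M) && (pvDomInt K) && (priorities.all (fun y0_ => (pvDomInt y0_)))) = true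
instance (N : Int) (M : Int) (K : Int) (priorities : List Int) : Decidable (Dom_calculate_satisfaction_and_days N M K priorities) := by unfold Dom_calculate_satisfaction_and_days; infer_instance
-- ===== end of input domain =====

-- B replaces A's incremental max-heap pop/reinsert loop by generating every priority's decay
-- chain up front, sorting all emitted values once in descending order, and one satisfaction scan.


-- ===== PORT A =====
-- heapq is ported by its contract: the heap is the list of stored values, heappop removes an
-- element of minimal value (List.min? + List.erase), heappush appends; A's result depends only
-- on the popped VALUES, never on positions inside the heap, so this is exact.
-- The while-loop runs on a fuel counter that is a guard for totality only: under
-- Pre_ (below) the fuel is provably sufficient and is never exhausted.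
def aLoop (M K : Int) : Nat → List Int → Int → Int → List Int → Int × List Int
  | 0, _, _, days, lst => (days, lst)
  | fuel+1, heap, sat, days, lst =>
    match heap.min? with
    | none => (days, lst)                     -- while max_heap: loop ends
    | some m =>
      let cp := -m                            -- current_priority = -heappop(max_heap)
      let sat' := PySem.Int.floordiv sat 2 + cp
      let cp' := cp - M
      aLoop M K fuel (if cp' > K then heap.erase m ++ [-cp'] else heap.erase m)
        sat' (days + 1) (lst ++ [sat'])

-- fuel: one unit per eventually-emitted value, over-approximated per priority by (p-K)+1
def aFuel (K : Int) (priorities : List Int) : Nat :=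
  priorities.foldr (fun p acc => (p - K).toNat + 1 + acc) 0

def calculate_satisfaction_and_days (N : Int) (M : Int) (K : Int) (priorities : List Int) : Int × List Int :=
  aLoop M K (aFuel K priorities) (priorities.map (fun p => -p)) 0 0 []

-- ===== PORT B =====
-- decay chain of one priority: p, p-M, p-2M, … kept while the next value stays > K.
-- fuel (p-K).toNat is a totality guard only; sufficient whenever the Python loop terminates.
def bChain (M K : Int) : Nat → Int → List Int
  | 0, p => [p]
  | f+1, p => if p - M > K then p :: bChain M K f (p - M) else [p]

def bScan (l : List Int) (sat : Int) : List Int :=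
  match l with
  | [] => []
  | v :: vs =>
    let s' := PySem.Int.floordiv sat 2 + v
    s' :: bScan vs s'

def calculate_satisfaction_and_days_alt (N : Int) (M : Int) (K : Int) (priorities : List Int) : Int × List Int :=
  let vals := priorities.flatMap (fun p => bChain M K (p - K).toNat p)
  let sortedVals := PySem.List.sorted vals (fun x => x) true
  let out := bScan sortedVals 0
  ((out.length : Int), out)

-- ===== PRECONDITION & SPEC =====
-- Pre_ excludes exactly the inputs on which A (and B alike) loop forever: a non-positive
-- decay M together with some priority p whose decayed value p - M still exceeds K.
def Pre_calculate_satisfaction_and_days (N : Int) (M : Int) (K : Int) (priorities : List Int) : Prop :=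
  0 < M ∨ ∀ p ∈ priorities, p - M ≤ K
instance (N : Int) (M : Int) (K : Int) (priorities : List Int) : Decidable (Pre_calculate_satisfaction_and_days N M K priorities) := by unfold Pre_calculate_satisfaction_and_days; infer_instance

def pvWitness_calculate_satisfaction_and_days : Int × Int × Int × List Int := (2, 2, 0, [5, 3])

def Spec_calculate_satisfaction_and_days (N : Int) (M : Int) (K : Int) (priorities : List Int) (out : Int × List Int) : Prop := out = calculate_satisfaction_and_days_alt N M K priorities
instance (N : Int) (M : Int) (K : Int) (priorities : List Int) (out : Int × List Int) : Decidable (Spec_calculate_satisfaction_and_days N M K priorities out) := by unfold Spec_calculate_satisfaction_and_days; infer_instance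

-- ===== CLAIM (what is proved, stated in full; the proofs are below) =====
def Claim_equal_calculate_satisfaction_and_days : Prop := ∀ (N : Int) (M : Int) (K : Int) (priorities : List Int), Dom_calculate_satisfaction_and_days N M K priorities → Pre_calculate_satisfaction_and_days N M K priorities → Spec_calculate_satisfaction_and_days N M K priorities (calculate_satisfaction_and_days N M K priorities)

-- ===== LEMMAS AND PROOFS =====

-- all values that A will eventually emit from a heap state (heap stores negated priorities)
def emitAll (M K : Int) (heap : List Int) : List Int :=
  heap.flatMap (fun m => bChain M K (-m - K).toNat (-m))

lemma bChain_singleton (M K : Int) (f : Nat) (p : Int) (h : ¬ p - M > K) :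
    bChain M K f p = [p] := by
  cases f with
  | zero => rfl
  | succ f => simp [bChain, h]

lemma bChain_length_le (M K : Int) (f : Nat) (p : Int) :
    (bChain M K f p).length ≤ f + 1 := by
  induction f generalizing p with
  | zero => simp [bChain]
  | succ f ih =>
    by_cases h : p - M > K
    · simp only [bChain, if_pos h, List.length_cons]
      exact Nat.succ_le_succ (ih (p - M))
    · simp [bChain, h]

lemma bChain_fuel_stable (M K : Int) (hM : 0 < M) :
    ∀ (f g : Nat) (p : Int), (p - K).toNat ≤ f → (p - K).toNat ≤ g →
    bChain M K f p = bChain M K g p := by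
  intro f
  induction f with
  | zero =>
    intro g p hf _
    have : ¬ p - M > K := by omega
    rw [bChain_singleton M K 0 p this, bChain_singleton M K g p this]
  | succ f ih =>
    intro g p hf hg
    by_cases h : p - M > K
    · have hg0 : g ≠ 0 := by
        intro h0; subst h0; omega
      obtain ⟨g', rfl⟩ := Nat.exists_eq_succ_of_ne_zero hg0
      simp only [bChain, if_pos h]
      rw [ih g' (p - M) (by omega) (by omega)]
    · rw [bChain_singleton M K (f+1) p h, bChain_singleton M K g p h]

lemma bChain_mem_le (M K : Int) (f : Nat) (p : Int)
    (hM : 0 < M ∨ p - M ≤ K) : ∀ x ∈ bChain M K f p, x ≤ p := by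
  induction f generalizing p with
  | zero => simp [bChain]
  | succ f ih =>
    intro x hx
    by_cases h : p - M > K
    · have hMpos : 0 < M := by rcases hM with h' | h' <;> omega
      simp only [bChain, if_pos h, List.mem_cons] at hx
      rcases hx with rfl | hx
      · exact le_refl x
      · have := ih (p - M) (Or.inl hMpos) x hx
        omega
    · simp [bChain_singleton M K (f+1) p h] at hx
      omega

-- descending-sorted: a maximal element comes first, the rest stays sorted
lemma sortedRev_cons_max (a : Int) (l rest : List Int)
    (hperm : l.Perm (a :: rest)) (hmax : ∀ x ∈ l, x ≤ a) :
    PySem.List.sorted l (fun x => x) true = a :: PySem.List.sorted rest (fun x => x) true := by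
  apply List.Perm.eq_of_pairwise (le := fun a b : Int => b ≤ a)
    (fun a b _ _ h1 h2 => le_antisymm h2 h1)
  · exact PySem.List.sorted_pairwise_rev l (fun x => x)
  · refine List.Pairwise.cons ?_ (PySem.List.sorted_pairwise_rev rest (fun x => x))
    intro x hx
    have hx' : x ∈ rest := (PySem.List.mem_sorted _ _ _ _).1 hx
    exact hmax x (hperm.mem_iff.mpr (List.mem_cons_of_mem a hx'))
  · refine ((PySem.List.sorted_perm l _ _).trans hperm).trans ?_
    exact List.Perm.cons a (PySem.List.sorted_perm rest _ _).symm

lemma emitAll_max (M K : Int) (heap : List Int) (m : Int)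
    (hle : ∀ x ∈ heap, m ≤ x)
    (hM : 0 < M ∨ ∀ x ∈ heap, -x - M ≤ K) :
    ∀ x ∈ emitAll M K heap, x ≤ -m := by
  intro x hx
  simp only [emitAll, List.mem_flatMap] at hx
  obtain ⟨m', hm', hx⟩ := hx
  have h1 : m ≤ m' := hle m' hm'
  have hside : 0 < M ∨ -m' - M ≤ K := by
    rcases hM with h | h
    · exact Or.inl h
    · exact Or.inr (h m' hm')
  have := bChain_mem_le M K _ (-m') hside x hx
  omega

-- one loop step rewrites emitAll by a cons (up to permutation)
lemma emitAll_perm_step (M K : Int) (heap : List Int) (m : Int)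
    (hmem : m ∈ heap)
    (hM : 0 < M ∨ ∀ x ∈ heap, -x - M ≤ K) :
    (emitAll M K heap).Perm
      (-m :: emitAll M K (if -m - M > K then heap.erase m ++ [-(-m - M)] else heap.erase m)) := by
  have hperm : heap.Perm (m :: heap.erase m) := List.perm_cons_erase hmem
  have h1 : (emitAll M K heap).Perm (emitAll M K (m :: heap.erase m)) :=
    List.Perm.flatMap_right _ hperm
  by_cases h : -m - M > K
  · have hMpos : 0 < M := by
      rcases hM with h' | h'
      · exact h'
      · have := h' m hmem; omega
    have hchain : bChain M K (-m - K).toNat (-m)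
        = -m :: bChain M K (-m - M - K).toNat (-m - M) := by
      have hfz : (-m - K).toNat ≠ 0 := by omega
      obtain ⟨f, hf⟩ := Nat.exists_eq_succ_of_ne_zero hfz
      rw [hf]
      simp only [bChain, if_pos h]
      congr 1
      exact bChain_fuel_stable M K hMpos f (-m - M - K).toNat (-m - M) (by omega) (by omega)
    rw [if_pos h]
    refine h1.trans ?_
    have e1 : emitAll M K (m :: heap.erase m)
        = bChain M K (-m - K).toNat (-m) ++ emitAll M K (heap.erase m) := by
      simp [emitAll]
    have e2 : emitAll M K (heap.erase m ++ [-(-m - M)])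
        = emitAll M K (heap.erase m) ++ bChain M K (-m - M - K).toNat (-m - M) := by
      simp [emitAll, show (-m + -M : Int) = -m - M from by ring]
    rw [e1, e2, hchain, List.cons_append]
    exact List.Perm.cons _ List.perm_append_comm
  · have hchain : bChain M K (-m - K).toNat (-m) = [-m] := bChain_singleton M K _ _ h
    rw [if_neg h]
    refine h1.trans ?_
    simp [emitAll, List.flatMap_cons, hchain]

lemma bScan_length (l : List Int) (sat : Int) : (bScan l sat).length = l.length := by
  induction l generalizing sat with
  | nil => rfl
  | cons v vs ih => simp [bScan, ih]

lemma aLoop_eq (M K : Int) (fuel : Nat) :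
    ∀ (heap : List Int) (sat days : Int) (lst : List Int),
    (0 < M ∨ ∀ x ∈ heap, -x - M ≤ K) →
    (emitAll M K heap).length ≤ fuel →
    aLoop M K fuel heap sat days lst
      = (days + ((emitAll M K heap).length : Int),
         lst ++ bScan (PySem.List.sorted (emitAll M K heap) (fun x => x) true) sat) := by
  induction fuel with
  | zero =>
    intro heap sat days lst _ hfuel
    have hnil : emitAll M K heap = [] := List.eq_nil_of_length_eq_zero (Nat.le_zero.mp hfuel)
    simp [aLoop, hnil, bScan, PySem.List.sorted]
  | succ fuel ih =>
    intro heap sat days lst hM hfuel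
    match hmin : heap.min? with
    | none =>
      have hheap : heap = [] := by
        cases heap with
        | nil => rfl
        | cons a t => simp [List.min?] at hmin
      subst hheap
      simp [aLoop, emitAll, bScan, PySem.List.sorted]
    | some m =>
      have hmm := (List.min?_eq_some_iff).mp hmin
      have hmem : m ∈ heap := hmm.1
      have hle : ∀ x ∈ heap, m ≤ x := hmm.2
      have hperm := emitAll_perm_step M K heap m hmem hM
      obtain ⟨heap', hheap'⟩ :
          ∃ h', (if -m - M > K then heap.erase m ++ [-(-m - M)] else heap.erase m) = h' := ⟨_, rfl⟩
      rw [hheap'] at hperm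
      have hmax := emitAll_max M K heap m hle hM
      have hsort : PySem.List.sorted (emitAll M K heap) (fun x => x) true
          = -m :: PySem.List.sorted (emitAll M K heap') (fun x => x) true :=
        sortedRev_cons_max (-m) _ _ hperm hmax
      have hlen : (emitAll M K heap).length = (emitAll M K heap').length + 1 := by
        rw [hperm.length_eq, List.length_cons]
      have hM' : 0 < M ∨ ∀ x ∈ heap', -x - M ≤ K := by
        rcases hM with h | h
        · exact Or.inl h
        · right
          intro x hx
          rw [← hheap'] at hx
          have hf : ¬ -m - M > K := by have := h m hmem; omega
          rw [if_neg hf] at hx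
          exact h x (heap.erase_subset hx)
      have step : aLoop M K (fuel+1) heap sat days lst
          = aLoop M K fuel heap'
              (PySem.Int.floordiv sat 2 + -m) (days + 1)
              (lst ++ [PySem.Int.floordiv sat 2 + -m]) := by
        simp only [aLoop, hmin, hheap']
      rw [step, ih heap' _ _ _ hM' (by omega)]
      rw [hsort]
      simp only [bScan]
      refine Prod.ext ?_ ?_
      · show days + 1 + _ = days + _
        rw [hlen]; push_cast; ring
      · simp

-- initial heap: emitAll over the negated priorities is exactly B's vals list
lemma emitAll_init (M K : Int) (priorities : List Int) :
    emitAll M K (priorities.map (fun p => -p))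
      = priorities.flatMap (fun p => bChain M K (p - K).toNat p) := by
  simp [emitAll, List.flatMap_map, sub_eq_add_neg]

lemma emitAll_init_len (M K : Int) (priorities : List Int) :
    (priorities.flatMap (fun p => bChain M K (p - K).toNat p)).length ≤ aFuel K priorities := by
  induction priorities with
  | nil => simp [aFuel]
  | cons p t ih =>
    simp only [List.flatMap_cons, List.length_append, aFuel, List.foldr_cons]
    have := bChain_length_le M K (p - K).toNat p
    have ih' := ih
    simp only [aFuel] at ih'
    omega

-- ===== VERDICT (by name: the statement is the Claim_ definition above) =====
theorem calculate_satisfaction_and_days_spec : Claim_equal_calculate_satisfaction_and_days := by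
  intro N M K priorities _ hpre
  unfold Spec_calculate_satisfaction_and_days
  unfold calculate_satisfaction_and_days calculate_satisfaction_and_days_alt
  have hM : 0 < M ∨ ∀ x ∈ priorities.map (fun p => -p), -x - M ≤ K := by
    rcases hpre with h | h
    · exact Or.inl h
    · right
      intro x hx
      simp only [List.mem_map] at hx
      obtain ⟨p, hp, rfl⟩ := hx
      have := h p hp
      omega
  have hfuel : (emitAll M K (priorities.map (fun p => -p))).length ≤ aFuel K priorities := by
    rw [emitAll_init]
    exact emitAll_init_len M K priorities
  rw [aLoop_eq M K (aFuel K priorities) _ 0 0 [] hM hfuel, emitAll_init]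
  refine Prod.ext ?_ ?_
  · show (0 : Int) + _ = ((bScan _ 0).length : Int)
    rw [bScan_length, PySem.List.length_sorted]; simp
  · simp
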